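-- pv_equiv track=rewrite | github.com/S-Christensen/cartographersStudy | scoringCards.py | craylund
-- ===== SOURCE A (Python) =====
-- def dfs(grid, row, col, visited, terrain_type):
--     stack = [(row, col)]
--     cluster = []
--
--     while stack:
--         r, c = stack.pop()
--         if (r, c) not in visited and grid[r][c] == terrain_type:
--             visited.add((r, c))
--             cluster.append((r, c))
--             for dr, dc in [(1, 0), (-1, 0), (0, 1), (0, -1)]:
--                 nr, nc = r + dr, c + dc
--                 if 0 <= nr < len(grid) and 0 <= nc < len(grid[0]):
--                     stack.append((nr, nc))
--     return cluster
--
-- def count_adjacent_water(grid, cluster):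
--     water_count = 0
--     for r, c in cluster:
--         for dr, dc in [(1, 0), (-1, 0), (0, 1), (0, -1)]:
--             nr, nc = r + dr, c + dc
--             if 0 <= nr < len(grid) and 0 <= nc < len(grid[0]) and grid[nr][nc] == "water":
--                 water_count += 1
--     return water_count
--
-- def craylund(grid):
--     visited = set()
--     clusters = []
--
--     for row in range(len(grid)):
--         for col in range(len(grid[0])):
--             if (row, col) not in visited and grid[row][col] == "farm":
--                 cluster = dfs(grid, row, col, visited, "farm")
--                 clusters.append(cluster)
--
--     count = 0
--     for cluster in clusters:
--         if count_adjacent_water(grid, cluster) >= 3: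
--             count += 1
--
--     return count*7
-- ===== SOURCE B (Python) =====
-- def craylund(grid):
--     # BFS flood fill with a pointer-queue, fused with the water tally (no clusters list,
--     # no duplicate stack entries: cells are marked when enqueued, not when popped).
--     if not grid:
--         return 0
--     rows = len(grid)
--     cols = len(grid[0])
--     visited = set()
--     total = 0
--     for r0 in range(rows):
--         for c0 in range(cols):
--             if grid[r0][c0] != "farm" or (r0, c0) in visited:
--                 continue
--             visited.add((r0, c0))
--             queue = [(r0, c0)]
--             qi = 0
--             water = 0
--             while qi < len(queue):
--                 r, c = queue[qi]
--                 qi += 1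
--                 for nr, nc in ((r + 1, c), (r - 1, c), (r, c + 1), (r, c - 1)):
--                     if 0 <= nr < rows and 0 <= nc < cols:
--                         t = grid[nr][nc]
--                         if t == "water":
--                             water += 1
--                         elif t == "farm" and (nr, nc) not in visited:
--                             visited.add((nr, nc))
--                             queue.append((nr, nc))
--             if water >= 3:
--                 total += 7
--     return total
-- ===== Notes on version B (the rewrite author's own statement) =====
-- stated objective: alternative
-- what changed: Replaces A's mark-at-pop DFS stack (which blindly re-pushes every neighbour, filters duplicates at pop, stores explicit cluster lists and re-walks them in a second counting pass) by a single fused pass: a mark-at-enqueue BFS pointer-queue that enqueues each cell exactly once and tallies adjacent water inline, adding 7 per qualifying cluster with no clusters list (measured ~1.4x faster at the largest generated size, below the 1.5x bar, so no speed is claimed).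
import Mathlib
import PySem

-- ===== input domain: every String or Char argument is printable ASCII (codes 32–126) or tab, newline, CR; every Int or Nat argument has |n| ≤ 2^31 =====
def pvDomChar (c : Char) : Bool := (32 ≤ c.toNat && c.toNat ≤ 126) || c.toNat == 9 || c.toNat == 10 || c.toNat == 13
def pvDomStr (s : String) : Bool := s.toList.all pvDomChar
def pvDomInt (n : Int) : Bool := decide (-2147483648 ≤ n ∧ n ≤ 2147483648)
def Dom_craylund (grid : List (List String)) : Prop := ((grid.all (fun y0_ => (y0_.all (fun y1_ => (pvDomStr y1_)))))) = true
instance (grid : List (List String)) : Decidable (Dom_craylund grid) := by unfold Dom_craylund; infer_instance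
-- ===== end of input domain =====

-- B replaces A's mark-at-pop DFS stack (with duplicate stack entries and a separate
-- clusters list + second counting pass) by a mark-at-enqueue BFS pointer-queue fused
-- with the water tally; same return value on every grid A accepts (Pre_).

-- ===== PORT A =====

-- grid[r][c] (two Python indexings chained; none = IndexError, unreachable under the bounds guards)
def pvTile (grid : List (List String)) (r c : Int) : Option String :=
  (PySem.List.pyGet? grid r).bind (fun row => PySem.List.pyGet? row c)

-- 0 <= r < len(grid) and 0 <= c < len(grid[0])
def pvInB (grid : List (List String)) (r c : Int) : Bool :=
  decide (0 ≤ r ∧ r < (grid.length : Int) ∧ 0 ≤ c ∧ c < ((grid.headD []).length : Int))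

-- the four neighbour candidates (r+dr, c+dc) for (dr,dc) in [(1,0),(-1,0),(0,1),(0,-1)]
def pvNbrs (p : Int × Int) : List (Int × Int) :=
  [(p.1 + 1, p.2), (p.1 - 1, p.2), (p.1, p.2 + 1), (p.1, p.2 - 1)]

-- 'if 0 <= nr < len(grid) and 0 <= nc < len(grid[0]): stack.append((nr, nc))'
-- (the head of the list is the top of the stack: append-then-pop-last = cons-then-pop-head)
def pvPush (grid : List (List String)) (st : List (Int × Int)) (q : Int × Int) : List (Int × Int) :=
  if pvInB grid q.1 q.2 then q :: st else st

-- the 'while stack:' loop of dfs; fuel only makes the loop total (pvFuelA is enough, see the lemmas)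
def pvDfsA (grid : List (List String)) (tt : String) :
    Nat → List (Int × Int) → PySem.Set (Int × Int) → List (Int × Int) →
    PySem.Set (Int × Int) × List (Int × Int)
  | _, [], visited, cluster => (visited, cluster)
  | 0, _ :: _, visited, cluster => (visited, cluster)
  | fuel + 1, (r, c) :: stack, visited, cluster =>
    if ¬ PySem.Set.contains visited (r, c) ∧ pvTile grid r c = some tt then
      let visited' := PySem.Set.add visited (r, c)
      let cluster' := cluster ++ [(r, c)]
      let stack' := pvPush grid (pvPush grid (pvPush grid (pvPush grid stack (r + 1, c)) (r - 1, c)) (r, c + 1)) (r, c - 1)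
      pvDfsA grid tt fuel stack' visited' cluster'
    else
      pvDfsA grid tt fuel stack visited cluster

def pvFuelA (grid : List (List String)) : Nat := 4 * (grid.length * (grid.headD []).length) + 1

-- count_adjacent_water
def pvCountAdjWater (grid : List (List String)) (cluster : List (Int × Int)) : Int :=
  cluster.foldl (fun acc p =>
    (pvNbrs p).foldl (fun a q =>
      if pvInB grid q.1 q.2 = true ∧ pvTile grid q.1 q.2 = some "water" then a + 1 else a) acc) 0

-- the body of A's double seed loop
def pvStepA (grid : List (List String))
    (st : PySem.Set (Int × Int) × List (List (Int × Int))) (p : Int × Int) :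
    PySem.Set (Int × Int) × List (List (Int × Int)) :=
  if ¬ PySem.Set.contains st.1 p ∧ pvTile grid p.1 p.2 = some "farm" then
    let r := pvDfsA grid "farm" (pvFuelA grid) [p] st.1 []
    (r.1, st.2 ++ [r.2])
  else st

def craylund (grid : List (List String)) : Int :=
  let fin := (List.range grid.length).foldl (fun st row =>
      (List.range (grid.headD []).length).foldl (fun st col =>
        pvStepA grid st ((row : Int), (col : Int))) st)
    (PySem.Set.empty, [])
  (fin.2.foldl (fun cnt cl => if pvCountAdjWater grid cl ≥ 3 then cnt + 1 else cnt) (0 : Int)) * 7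

-- ===== PORT B =====

-- one neighbour (nr, nc) of the dequeued cell: water tally / enqueue-and-mark / skip
def pvBfsStep (grid : List (List String))
    (st : PySem.Set (Int × Int) × List (Int × Int) × Int) (q : Int × Int) :
    PySem.Set (Int × Int) × List (Int × Int) × Int :=
  if pvInB grid q.1 q.2 then
    if pvTile grid q.1 q.2 = some "water" then (st.1, st.2.1, st.2.2 + 1)
    else if pvTile grid q.1 q.2 = some "farm" ∧ ¬ PySem.Set.contains st.1 q then
      (PySem.Set.add st.1 q, st.2.1 ++ [q], st.2.2)
    else st
  else st

-- 'while qi < len(queue):' — fuel only makes the loop total (pvFuelB is enough, see the lemmas)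
def pvBfsB (grid : List (List String)) :
    Nat → PySem.Set (Int × Int) → List (Int × Int) → Nat → Int →
    PySem.Set (Int × Int) × Int
  | 0, visited, _, _, water => (visited, water)
  | fuel + 1, visited, queue, qi, water =>
    if qi < queue.length then
      let p := queue.getD qi (0, 0)   -- queue[qi]; in range by the loop guard
      let st := (pvNbrs p).foldl (pvBfsStep grid) (visited, queue, water)
      pvBfsB grid fuel st.1 st.2.1 (qi + 1) st.2.2
    else (visited, water)

def pvFuelB (grid : List (List String)) : Nat := grid.length * (grid.headD []).length + 1

-- the body of B's double seed loop
def pvStepB (grid : List (List String))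
    (st : PySem.Set (Int × Int) × Int) (p : Int × Int) : PySem.Set (Int × Int) × Int :=
  if pvTile grid p.1 p.2 = some "farm" ∧ ¬ PySem.Set.contains st.1 p then
    let r := pvBfsB grid (pvFuelB grid) (PySem.Set.add st.1 p) [p] 0 0
    (r.1, if r.2 ≥ 3 then st.2 + 7 else st.2)
  else st

def craylund_alt (grid : List (List String)) : Int :=
  if grid.isEmpty then 0
  else
    ((List.range grid.length).foldl (fun st row =>
        (List.range (grid.headD []).length).foldl (fun st col =>
          pvStepB grid st ((row : Int), (col : Int))) st)
      (PySem.Set.empty, 0)).2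

-- ===== PRECONDITION & SPEC =====

-- Pre_ excludes exactly the grids on which the Python A raises IndexError: a non-empty
-- grid with some row shorter than row 0 (A indexes every row at the columns of row 0).
def Pre_craylund (grid : List (List String)) : Prop :=
  ∀ row ∈ grid, (grid.headD []).length ≤ row.length
instance (grid : List (List String)) : Decidable (Pre_craylund grid) := by
  unfold Pre_craylund; infer_instance

def pvWitness_craylund : List (List String) :=
  [["farm", "water"], ["water", "farm"]]

def Spec_craylund (grid : List (List String)) (out : Int) : Prop := out = craylund_alt grid
instance (grid : List (List String)) (out : Int) : Decidable (Spec_craylund grid out) := by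
  unfold Spec_craylund; infer_instance

-- ===== CLAIM (what is proved, stated in full; the proofs are below) =====
def Claim_equal_craylund : Prop := ∀ (grid : List (List String)), Dom_craylund grid → Pre_craylund grid → Spec_craylund grid (craylund grid)

-- ===== LEMMAS AND PROOFS =====

-- abstract layer: farm cells, adjacency, connectivity
def Farm (g : List (List String)) (p : Int × Int) : Prop :=
  pvInB g p.1 p.2 = true ∧ pvTile g p.1 p.2 = some "farm"

def AdjF (g : List (List String)) (a b : Int × Int) : Prop :=
  Farm g a ∧ Farm g b ∧ b ∈ pvNbrs a

def Conn (g : List (List String)) (s x : Int × Int) : Prop :=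
  Relation.ReflTransGen (AdjF g) s x

def ClosedV (g : List (List String)) (V : List (Int × Int)) : Prop :=
  ∀ a b, a ∈ V → AdjF g a b → b ∈ V

def pvCells (g : List (List String)) : List (Int × Int) :=
  (List.range g.length).flatMap (fun r =>
    (List.range (g.headD []).length).map (fun c => ((r : Int), (c : Int))))

-- number of in-bounds cells not yet visited (the loop measure)
def UC (g : List (List String)) (V : PySem.Set (Int × Int)) : Nat :=
  ((pvCells g).toFinset.filter (fun x => x ∉ V)).card

-- per-cell water tally (the inner 4-neighbour loop of count_adjacent_water, as a count)
def pvWaterAt (g : List (List String)) (p : Int × Int) : Int :=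
  ((pvNbrs p).countP (fun q => decide (pvInB g q.1 q.2 = true ∧ pvTile g q.1 q.2 = some "water")) : Int)

lemma mem_pvNbrs_symm (a b : Int × Int) : a ∈ pvNbrs b ↔ b ∈ pvNbrs a := by
  obtain ⟨a1, a2⟩ := a; obtain ⟨b1, b2⟩ := b
  simp [pvNbrs, Prod.ext_iff]
  constructor <;> (intro h; rcases h with ⟨h1,h2⟩|⟨h1,h2⟩|⟨h1,h2⟩|⟨h1,h2⟩ <;> omega)

lemma adjF_symm {g : List (List String)} {a b : Int × Int} (h : AdjF g a b) : AdjF g b a :=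
  ⟨h.2.1, h.1, (mem_pvNbrs_symm a b).mpr h.2.2⟩

lemma conn_farm {g : List (List String)} {s x : Int × Int} (hs : Farm g s) (h : Conn g s x) :
    Farm g x := by
  induction h with
  | refl => exact hs
  | tail _ h2 ih => exact h2.2.1

lemma conn_mem_of_closed {g : List (List String)} {s : Int × Int} {Q : List (Int × Int)}
    (hs : s ∈ Q) (hcl : ∀ y ∈ Q, ∀ z, AdjF g y z → z ∈ Q) :
    ∀ x, Conn g s x → x ∈ Q := by
  intro x h
  induction h with
  | refl => exact hs
  | tail _ h2 ih => exact hcl _ ih _ h2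

lemma mem_pvCells {g : List (List String)} {p : Int × Int} :
    p ∈ pvCells g ↔ pvInB g p.1 p.2 = true := by
  obtain ⟨r, c⟩ := p
  simp only [pvCells, pvInB]
  simp [Prod.mk.injEq]
  constructor
  · rintro ⟨⟨a, ha, rfl⟩, ⟨b, hb, rfl⟩⟩
    omega
  · rintro ⟨h1, h2, h3, h4⟩
    exact ⟨⟨r.toNat, by omega, by omega⟩, ⟨c.toNat, by omega, by omega⟩⟩

lemma length_pvCells (g : List (List String)) :
    (pvCells g).length = g.length * (g.headD []).length := by
  simp [pvCells, List.length_flatMap]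

lemma UC_le (g : List (List String)) (V : PySem.Set (Int × Int)) :
    UC g V ≤ g.length * (g.headD []).length := by
  calc UC g V ≤ (pvCells g).toFinset.card := Finset.card_filter_le _ _
    _ ≤ (pvCells g).length := (pvCells g).toFinset_card_le
    _ = _ := length_pvCells g

lemma UC_add {g : List (List String)} {V : PySem.Set (Int × Int)} {p : Int × Int}
    (h1 : pvInB g p.1 p.2 = true) (h2 : p ∉ V) :
    UC g (PySem.Set.add V p) + 1 = UC g V := by
  have hmem : p ∈ (pvCells g).toFinset.filter (fun x => x ∉ V) := by
    simp [List.mem_toFinset, mem_pvCells, h1, h2]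
  have heq : (pvCells g).toFinset.filter (fun x => (x ∉ PySem.Set.add V p)) =
      ((pvCells g).toFinset.filter (fun x => x ∉ V)).erase p := by
    ext x
    simp [Finset.mem_erase, PySem.Set.mem_add]
    tauto
  unfold UC
  rw [heq, Finset.card_erase_of_mem hmem]
  have := Finset.card_pos.mpr ⟨p, hmem⟩
  omega

lemma mem_pvPush {g : List (List String)} {st : List (Int × Int)} {q z : Int × Int} :
    z ∈ pvPush g st q ↔ (z = q ∧ pvInB g q.1 q.2 = true) ∨ z ∈ st := by
  unfold pvPush; split <;> simp_all

lemma length_pvPush (g : List (List String)) (st : List (Int × Int)) (q : Int × Int) :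
    (pvPush g st q).length ≤ st.length + 1 := by
  unfold pvPush; split <;> simp

lemma pvDfsA_nil (g : List (List String)) (tt : String) (fuel : Nat)
    (V : PySem.Set (Int × Int)) (cl : List (Int × Int)) :
    pvDfsA g tt fuel [] V cl = (V, cl) := by cases fuel <;> rfl

lemma pvDfsA_cons (g : List (List String)) (tt : String) (n : Nat) (r c : Int)
    (rest : List (Int × Int)) (V : PySem.Set (Int × Int)) (cl : List (Int × Int)) :
    pvDfsA g tt (n + 1) ((r, c) :: rest) V cl
      = if ¬ PySem.Set.contains V (r, c) ∧ pvTile g r c = some tt then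
          pvDfsA g tt n
            (pvPush g (pvPush g (pvPush g (pvPush g rest (r + 1, c)) (r - 1, c)) (r, c + 1)) (r, c - 1))
            (PySem.Set.add V (r, c)) (cl ++ [(r, c)])
        else pvDfsA g tt n rest V cl := rfl

lemma dfsA_nil (g : List (List String)) (s : Int × Int)
    (V₀ : PySem.Set (Int × Int)) (hV₀c : ClosedV g V₀)
    (V : PySem.Set (Int × Int)) (cl : List (Int × Int))
    (hVmem : ∀ x, x ∈ V ↔ (x ∈ V₀ ∨ x ∈ cl))
    (hnd : cl.Nodup)
    (hconn : ∀ x ∈ cl, Conn g s x)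
    (hclV0 : ∀ x ∈ cl, x ∉ V₀)
    (hpend : ∀ y ∈ cl, ∀ z ∈ pvNbrs y, pvInB g z.1 z.2 = true → (z ∈ V ∨ z ∈ ([] : List (Int × Int)) ∨ ¬ Farm g z))
    (hseed : s ∈ cl) :
    (cl.Nodup ∧ (∀ x, x ∈ V ↔ (x ∈ V₀ ∨ x ∈ cl)) ∧
     (∀ x ∈ cl, Conn g s x ∧ x ∉ V₀) ∧ s ∈ cl ∧
     (∀ y ∈ cl, ∀ z, AdjF g y z → z ∈ cl)) := by
  refine ⟨hnd, hVmem, fun x hx => ⟨hconn x hx, hclV0 x hx⟩, hseed, ?_⟩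
  intro y hy z hadj
  have hzF : Farm g z := hadj.2.1
  rcases hpend y hy z hadj.2.2 hzF.1 with h | h | h
  · rcases (hVmem z).mp h with h0 | h0
    · exact absurd (hV₀c z y h0 (adjF_symm hadj)) (hclV0 y hy)
    · exact h0
  · simp at h
  · exact absurd hzF h

set_option maxHeartbeats 1000000 in
lemma dfsA_main (g : List (List String)) (s : Int × Int) (hsF : Farm g s)
    (V₀ : PySem.Set (Int × Int)) (hV₀c : ClosedV g V₀) (hsV₀ : s ∉ V₀) :
    ∀ (fuel : Nat) (stack : List (Int × Int)) (V : PySem.Set (Int × Int)) (cl : List (Int × Int)),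
    4 * UC g V + stack.length ≤ fuel →
    (∀ x, x ∈ V ↔ (x ∈ V₀ ∨ x ∈ cl)) →
    cl.Nodup →
    (∀ x ∈ cl, Conn g s x) →
    (∀ x ∈ cl, x ∉ V₀) →
    (∀ x ∈ stack, pvInB g x.1 x.2 = true ∧ (Farm g x → Conn g s x)) →
    (∀ y ∈ cl, ∀ z ∈ pvNbrs y, pvInB g z.1 z.2 = true → (z ∈ V ∨ z ∈ stack ∨ ¬ Farm g z)) →
    (s ∈ stack ∨ s ∈ cl) →
    ((pvDfsA g "farm" fuel stack V cl).2.Nodup ∧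
     (∀ x, x ∈ (pvDfsA g "farm" fuel stack V cl).1 ↔ (x ∈ V₀ ∨ x ∈ (pvDfsA g "farm" fuel stack V cl).2)) ∧
     (∀ x ∈ (pvDfsA g "farm" fuel stack V cl).2, Conn g s x ∧ x ∉ V₀) ∧
     s ∈ (pvDfsA g "farm" fuel stack V cl).2 ∧
     (∀ y ∈ (pvDfsA g "farm" fuel stack V cl).2, ∀ z, AdjF g y z → z ∈ (pvDfsA g "farm" fuel stack V cl).2)) := by
  intro fuel
  induction fuel with
  | zero =>
    intro stack V cl hfuel hVmem hnd hconn hclV0 hstack hpend hseed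
    cases stack with
    | nil =>
      rw [pvDfsA_nil]
      exact dfsA_nil g s V₀ hV₀c V cl hVmem hnd hconn hclV0 hpend
        (hseed.resolve_left (by simp))
    | cons x rest => simp at hfuel
  | succ n ih =>
    intro stack V cl hfuel hVmem hnd hconn hclV0 hstack hpend hseed
    cases stack with
    | nil =>
      rw [pvDfsA_nil]
      exact dfsA_nil g s V₀ hV₀c V cl hVmem hnd hconn hclV0 hpend
        (hseed.resolve_left (by simp))
    | cons x rest =>
      obtain ⟨r, c⟩ := x
      by_cases hc : (¬ PySem.Set.contains V (r, c) = true ∧ pvTile g r c = some "farm")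
      · -- visit step
        have hxInB : pvInB g r c = true := (hstack (r, c) (by simp)).1
        have hxF : Farm g (r, c) := ⟨hxInB, hc.2⟩
        have hxV : (r, c) ∉ V := fun h => hc.1 ((PySem.Set.contains_iff V (r, c)).mpr h)
        have hxConn : Conn g s (r, c) := (hstack (r, c) (by simp)).2 hxF
        have hxcl : (r, c) ∉ cl := fun h => hxV ((hVmem _).mpr (Or.inr h))
        have hxV0 : (r, c) ∉ V₀ := fun h => hxV ((hVmem _).mpr (Or.inl h))
        have hUC : UC g (PySem.Set.add V (r, c)) + 1 = UC g V := UC_add hxInB hxV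
        have hstep : pvDfsA g "farm" (n + 1) ((r, c) :: rest) V cl
            = pvDfsA g "farm" n
                (pvPush g (pvPush g (pvPush g (pvPush g rest (r + 1, c)) (r - 1, c)) (r, c + 1)) (r, c - 1))
                (PySem.Set.add V (r, c)) (cl ++ [(r, c)]) := by
          rw [pvDfsA_cons, if_pos hc]
        rw [hstep]
        apply ih
        · have h4 := length_pvPush g rest (r + 1, c)
          have h3 := length_pvPush g (pvPush g rest (r + 1, c)) (r - 1, c)
          have h2 := length_pvPush g (pvPush g (pvPush g rest (r + 1, c)) (r - 1, c)) (r, c + 1)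
          have h1 := length_pvPush g (pvPush g (pvPush g (pvPush g rest (r + 1, c)) (r - 1, c)) (r, c + 1)) (r, c - 1)
          simp only [List.length_cons] at hfuel
          omega
        · intro x
          simp only [PySem.Set.mem_add, hVmem, List.mem_append, List.mem_singleton]
          tauto
        · rw [List.nodup_append]
          refine ⟨hnd, List.nodup_singleton _, ?_⟩
          intro a ha b hb
          rw [List.mem_singleton] at hb
          subst hb
          exact fun hab => hxcl (hab ▸ ha)
        · intro x hx
          rcases List.mem_append.mp hx with h | h
          · exact hconn x h
          · simp at h; subst h; exact hxConn
        · intro x hx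
          rcases List.mem_append.mp hx with h | h
          · exact hclV0 x h
          · simp at h; subst h; exact hxV0
        · intro z hz
          simp only [mem_pvPush] at hz
          rcases hz with ⟨rfl, hin⟩ | ⟨rfl, hin⟩ | ⟨rfl, hin⟩ | ⟨rfl, hin⟩ | hz
          · exact ⟨hin, fun hF => Relation.ReflTransGen.tail hxConn ⟨hxF, hF, by simp [pvNbrs]⟩⟩
          · exact ⟨hin, fun hF => Relation.ReflTransGen.tail hxConn ⟨hxF, hF, by simp [pvNbrs]⟩⟩
          · exact ⟨hin, fun hF => Relation.ReflTransGen.tail hxConn ⟨hxF, hF, by simp [pvNbrs]⟩⟩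
          · exact ⟨hin, fun hF => Relation.ReflTransGen.tail hxConn ⟨hxF, hF, by simp [pvNbrs]⟩⟩
          · exact hstack z (List.mem_cons_of_mem _ hz)
        · intro y hy z hzN hinB
          rcases List.mem_append.mp hy with h | h
          · rcases hpend y h z hzN hinB with h0 | h0 | h0
            · exact Or.inl (by simp [PySem.Set.mem_add, h0])
            · rcases List.mem_cons.mp h0 with h1 | h1
              · exact Or.inl (by simp [PySem.Set.mem_add, h1])
              · refine Or.inr (Or.inl ?_)
                simp only [mem_pvPush]; tauto
            · exact Or.inr (Or.inr h0)
          · simp at h; subst h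
            refine Or.inr (Or.inl ?_)
            have : z = (r + 1, c) ∨ z = (r - 1, c) ∨ z = (r, c + 1) ∨ z = (r, c - 1) := by
              simpa [pvNbrs] using hzN
            simp only [mem_pvPush]
            rcases this with rfl | rfl | rfl | rfl <;> tauto
        · rcases hseed with h | h
          · rcases List.mem_cons.mp h with h1 | h1
            · exact Or.inr (by simp [← h1])
            · refine Or.inl ?_; simp only [mem_pvPush]; tauto
          · exact Or.inr (by simp [h])
      · -- skip step
        have hstep : pvDfsA g "farm" (n + 1) ((r, c) :: rest) V cl
            = pvDfsA g "farm" n rest V cl := by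
          rw [pvDfsA_cons, if_neg hc]
        rw [hstep]
        apply ih
        · simp only [List.length_cons] at hfuel; omega
        · exact hVmem
        · exact hnd
        · exact hconn
        · exact hclV0
        · exact fun x hx => hstack x (by simp [hx])
        · intro y hy z hzN hinB
          rcases hpend y hy z hzN hinB with h0 | h0 | h0
          · exact Or.inl h0
          · rcases List.mem_cons.mp h0 with h1 | h1
            · rcases Decidable.not_and_iff_or_not.mp hc with h2 | h2
              · have : z ∈ V := by
                  rw [h1]
                  exact (PySem.Set.contains_iff V _).mp (Decidable.not_not.mp h2)
                exact Or.inl this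
              · refine Or.inr (Or.inr (fun hF => h2 ?_))
                rw [h1] at hF
                exact hF.2
            · exact Or.inr (Or.inl h1)
          · exact Or.inr (Or.inr h0)
        · rcases hseed with h | h
          · rcases List.mem_cons.mp h with h1 | h1
            · -- s is the popped cell and was skipped: it must be visited, hence in cl
              rcases Decidable.not_and_iff_or_not.mp hc with h2 | h2
              · have hsV : s ∈ V := by
                  rw [h1]
                  exact (PySem.Set.contains_iff V _).mp (Decidable.not_not.mp h2)
                rcases (hVmem s).mp hsV with h3 | h3
                · exact absurd h3 hsV₀
                · exact Or.inr h3
              · exact absurd (by rw [h1] at hsF; exact hsF.2) h2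
            · exact Or.inl h1
          · exact Or.inr h

set_option maxHeartbeats 1000000 in
lemma bfsStep_fold (g : List (List String)) (s p : Int × Int) (V₀ : PySem.Set (Int × Int))
    (hpF : Farm g p) (hconnp : Conn g s p) :
    ∀ (ns : List (Int × Int)) (V : PySem.Set (Int × Int)) (queue : List (Int × Int)) (water : Int),
    (∀ z ∈ ns, z ∈ pvNbrs p) →
    queue.Nodup →
    (∀ x, x ∈ V ↔ (x ∈ V₀ ∨ x ∈ queue)) →
    (∀ x ∈ queue, Farm g x ∧ Conn g s x ∧ x ∉ V₀) →
    ((∃ ext, (ns.foldl (pvBfsStep g) (V, queue, water)).2.1 = queue ++ ext) ∧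
     (ns.foldl (pvBfsStep g) (V, queue, water)).2.1.Nodup ∧
     (∀ x, x ∈ (ns.foldl (pvBfsStep g) (V, queue, water)).1 ↔ (x ∈ V₀ ∨ x ∈ (ns.foldl (pvBfsStep g) (V, queue, water)).2.1)) ∧
     (∀ x ∈ (ns.foldl (pvBfsStep g) (V, queue, water)).2.1, Farm g x ∧ Conn g s x ∧ x ∉ V₀) ∧
     UC g (ns.foldl (pvBfsStep g) (V, queue, water)).1 + (ns.foldl (pvBfsStep g) (V, queue, water)).2.1.length = UC g V + queue.length ∧
     (ns.foldl (pvBfsStep g) (V, queue, water)).2.2 = water + (ns.countP (fun q => decide (pvInB g q.1 q.2 = true ∧ pvTile g q.1 q.2 = some "water")) : Int) ∧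
     (∀ z ∈ ns, pvInB g z.1 z.2 = true → Farm g z → z ∈ (ns.foldl (pvBfsStep g) (V, queue, water)).1) ∧
     (∀ x, x ∈ V → x ∈ (ns.foldl (pvBfsStep g) (V, queue, water)).1)) := by
  intro ns
  induction ns with
  | nil =>
    intro V queue water hns hnd hVmem hq
    simp only [List.foldl_nil]
    refine ⟨⟨[], by simp⟩, hnd, hVmem, hq, by simp, by simp, by simp, fun x h => h⟩
  | cons z ns' ih =>
    intro V queue water hns hnd hVmem hq
    have hzN : z ∈ pvNbrs p := hns z (by simp)
    rw [List.foldl_cons]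
    by_cases h1 : pvInB g z.1 z.2 = true
    · by_cases h2 : pvTile g z.1 z.2 = some "water"
      · -- water neighbour: only the tally moves
        have hst : pvBfsStep g (V, queue, water) z = (V, queue, water + 1) := by
          simp [pvBfsStep, h1, h2]
        rw [hst]
        obtain ⟨hext, hnd', hVmem', hq', hUC', hw', hvis', hmono'⟩ :=
          ih V queue (water + 1) (fun x hx => hns x (by simp [hx])) hnd hVmem hq
        refine ⟨hext, hnd', hVmem', hq', hUC', ?_, ?_, hmono'⟩
        · rw [hw', List.countP_cons]
          simp [h1, h2]
          ring
        · intro w hw hinB hF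
          rcases List.mem_cons.mp hw with rfl | hw0
          · exact absurd (hF.2.symm.trans h2) (by simp)
          · exact hvis' w hw0 hinB hF
      · by_cases h3 : pvTile g z.1 z.2 = some "farm" ∧ ¬ PySem.Set.contains V z = true
        · -- new farm cell: mark and enqueue
          have hzV : z ∉ V := fun h => h3.2 ((PySem.Set.contains_iff V z).mpr h)
          have hst : pvBfsStep g (V, queue, water) z
              = (PySem.Set.add V z, queue ++ [z], water) := by
            simp [pvBfsStep, h1, h3.1, hzV]
          rw [hst]
          have hzq : z ∉ queue := fun h => hzV ((hVmem z).mpr (Or.inr h))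
          have hzV₀ : z ∉ V₀ := fun h => hzV ((hVmem z).mpr (Or.inl h))
          have hzF : Farm g z := ⟨h1, h3.1⟩
          have hzC : Conn g s z := Relation.ReflTransGen.tail hconnp ⟨hpF, hzF, hzN⟩
          obtain ⟨⟨ext1, hext1⟩, hnd', hVmem', hq', hUC', hw', hvis', hmono'⟩ :=
            ih (PySem.Set.add V z) (queue ++ [z]) water
              (fun x hx => hns x (by simp [hx]))
              (by
                rw [List.nodup_append]
                refine ⟨hnd, List.nodup_singleton _, ?_⟩
                intro a ha b hb
                rw [List.mem_singleton] at hb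
                subst hb
                exact fun he => hzq (he ▸ ha))
              (by
                intro x
                simp only [PySem.Set.mem_add, hVmem, List.mem_append, List.mem_singleton]
                tauto)
              (by
                intro x hx
                rcases List.mem_append.mp hx with h | h
                · exact hq x h
                · rw [List.mem_singleton] at h; subst h; exact ⟨hzF, hzC, hzV₀⟩)
          refine ⟨⟨[z] ++ ext1, by rw [hext1, List.append_assoc]⟩, hnd', hVmem', hq', ?_, ?_, ?_, ?_⟩
          · rw [hUC']
            have := UC_add (V := V) h1 hzV
            simp only [List.length_append, List.length_singleton]
            omega
          · rw [hw', List.countP_cons]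
            simp [h1, h2]
          · intro w hw hinB hF
            rcases List.mem_cons.mp hw with rfl | hw0
            · exact hmono' w (by simp [PySem.Set.mem_add])
            · exact hvis' w hw0 hinB hF
          · exact fun x h => hmono' x (by simp [PySem.Set.mem_add, h])
        · -- skipped neighbour (already visited, or not a farm tile)
          have hst : pvBfsStep g (V, queue, water) z = (V, queue, water) := by
            by_cases h4 : pvTile g z.1 z.2 = some "farm"
            · have hzV : z ∈ V := by
                rcases Decidable.not_and_iff_or_not.mp h3 with h5 | h5
                · exact absurd h4 h5
                · exact (PySem.Set.contains_iff V z).mp (Decidable.not_not.mp h5)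
              simp [pvBfsStep, h1, h2, hzV]
            · simp [pvBfsStep, h1, h2, h4]
          rw [hst]
          obtain ⟨hext, hnd', hVmem', hq', hUC', hw', hvis', hmono'⟩ :=
            ih V queue water (fun x hx => hns x (by simp [hx])) hnd hVmem hq
          refine ⟨hext, hnd', hVmem', hq', hUC', ?_, ?_, hmono'⟩
          · rw [hw', List.countP_cons]
            simp [h1, h2]
          · intro w hw hinB hF
            rcases List.mem_cons.mp hw with rfl | hw0
            · rcases Decidable.not_and_iff_or_not.mp h3 with h4 | h4
              · exact absurd hF.2 h4
              · have : w ∈ V := (PySem.Set.contains_iff V w).mp (Decidable.not_not.mp h4)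
                exact hmono' w this
            · exact hvis' w hw0 hinB hF
    · -- out of bounds: nothing happens
      have hst : pvBfsStep g (V, queue, water) z = (V, queue, water) := by
        simp [pvBfsStep, h1]
      rw [hst]
      obtain ⟨hext, hnd', hVmem', hq', hUC', hw', hvis', hmono'⟩ :=
        ih V queue water (fun x hx => hns x (by simp [hx])) hnd hVmem hq
      refine ⟨hext, hnd', hVmem', hq', hUC', ?_, ?_, hmono'⟩
      · rw [hw', List.countP_cons]
        simp [h1]
      · intro w hw hinB hF
        rcases List.mem_cons.mp hw with rfl | hw0
        · exact absurd hinB h1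
        · exact hvis' w hw0 hinB hF

lemma pvBfsB_succ (g : List (List String)) (n : Nat) (V : PySem.Set (Int × Int))
    (queue : List (Int × Int)) (qi : Nat) (water : Int) :
    pvBfsB g (n + 1) V queue qi water
      = if qi < queue.length then
          pvBfsB g n ((pvNbrs (queue.getD qi (0, 0))).foldl (pvBfsStep g) (V, queue, water)).1
            ((pvNbrs (queue.getD qi (0, 0))).foldl (pvBfsStep g) (V, queue, water)).2.1 (qi + 1)
            ((pvNbrs (queue.getD qi (0, 0))).foldl (pvBfsStep g) (V, queue, water)).2.2
        else (V, water) := rfl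

lemma bfsB_done (g : List (List String)) (s : Int × Int)
    (V₀ : PySem.Set (Int × Int)) (hV₀c : ClosedV g V₀)
    (V : PySem.Set (Int × Int)) (queue : List (Int × Int)) (qi : Nat) (water : Int)
    (hnd : queue.Nodup)
    (hq : ∀ x ∈ queue, Farm g x ∧ Conn g s x ∧ x ∉ V₀)
    (hVmem : ∀ x, x ∈ V ↔ (x ∈ V₀ ∨ x ∈ queue))
    (hdone : ∀ y ∈ queue.take qi, ∀ z ∈ pvNbrs y, pvInB g z.1 z.2 = true → Farm g z → z ∈ V)
    (hw : water = ((queue.take qi).map (pvWaterAt g)).sum)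
    (hseed : s ∈ queue) (hqi : queue.length ≤ qi) :
    queue.Nodup ∧ (∀ x, x ∈ V ↔ (x ∈ V₀ ∨ x ∈ queue)) ∧
      (∀ x ∈ queue, Conn g s x ∧ x ∉ V₀) ∧ s ∈ queue ∧
      (∀ y ∈ queue, ∀ z, AdjF g y z → z ∈ queue) ∧
      water = (queue.map (pvWaterAt g)).sum := by
  have htake : queue.take qi = queue := List.take_of_length_le hqi
  refine ⟨hnd, hVmem, fun x hx => ⟨(hq x hx).2.1, (hq x hx).2.2⟩, hseed, ?_, by rw [hw, htake]⟩
  intro y hy z hadj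
  have hzF : Farm g z := hadj.2.1
  have hz : z ∈ V := hdone y (by rw [htake]; exact hy) z hadj.2.2 hzF.1 hzF
  rcases (hVmem z).mp hz with h0 | h0
  · exact absurd (hV₀c z y h0 (adjF_symm hadj)) (hq y hy).2.2
  · exact h0

set_option maxHeartbeats 1000000 in
lemma bfsB_main (g : List (List String)) (s : Int × Int) (_hsF : Farm g s)
    (V₀ : PySem.Set (Int × Int)) (hV₀c : ClosedV g V₀) (_hsV₀ : s ∉ V₀) :
    ∀ (fuel : Nat) (V : PySem.Set (Int × Int)) (queue : List (Int × Int)) (qi : Nat) (water : Int),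
    (queue.length - qi) + UC g V ≤ fuel →
    qi ≤ queue.length →
    queue.Nodup →
    (∀ x ∈ queue, Farm g x ∧ Conn g s x ∧ x ∉ V₀) →
    (∀ x, x ∈ V ↔ (x ∈ V₀ ∨ x ∈ queue)) →
    (∀ y ∈ queue.take qi, ∀ z ∈ pvNbrs y, pvInB g z.1 z.2 = true → Farm g z → z ∈ V) →
    water = ((queue.take qi).map (pvWaterAt g)).sum →
    s ∈ queue →
    ∃ Q : List (Int × Int),
      Q.Nodup ∧
      (∀ x, x ∈ (pvBfsB g fuel V queue qi water).1 ↔ (x ∈ V₀ ∨ x ∈ Q)) ∧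
      (∀ x ∈ Q, Conn g s x ∧ x ∉ V₀) ∧
      s ∈ Q ∧
      (∀ y ∈ Q, ∀ z, AdjF g y z → z ∈ Q) ∧
      (pvBfsB g fuel V queue qi water).2 = (Q.map (pvWaterAt g)).sum := by
  intro fuel
  induction fuel with
  | zero =>
    intro V queue qi water hfuel hqi hnd hq hVmem hdone hw hseed
    have hqi' : queue.length ≤ qi := by omega
    obtain ⟨a, b, c, d, e, f⟩ :=
      bfsB_done g s V₀ hV₀c V queue qi water hnd hq hVmem hdone hw hseed hqi'
    exact ⟨queue, a, b, c, d, e, f⟩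
  | succ n ih =>
    intro V queue qi water hfuel hqi hnd hq hVmem hdone hw hseed
    by_cases hlt : qi < queue.length
    · rw [pvBfsB_succ, if_pos hlt]
      set p := queue.getD qi (0, 0) with hpdef
      have hpd : p = queue[qi] := by
        rw [hpdef, List.getD_eq_getElem?_getD, List.getElem?_eq_getElem hlt]
        rfl
      have hp : p ∈ queue := by rw [hpd]; exact List.getElem_mem hlt
      have hpF : Farm g p := (hq p hp).1
      have hpC : Conn g s p := (hq p hp).2.1
      obtain ⟨⟨ext, hext⟩, hnd', hVmem', hq', hUC', hw', hvis', hmono'⟩ :=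
        bfsStep_fold g s p V₀ hpF hpC (pvNbrs p) V queue water
          (fun z hz => hz) hnd hVmem hq
      set st := (pvNbrs p).foldl (pvBfsStep g) (V, queue, water) with hstdef
      have hlen : queue.length ≤ st.2.1.length := by
        rw [hext]; simp
      have htake1 : st.2.1.take (qi + 1) = queue.take qi ++ [p] := by
        rw [hext, List.take_append_of_le_length (by omega), List.take_add_one,
          List.getElem?_eq_getElem hlt]
        simp [hpd]
      apply ih st.1 st.2.1 (qi + 1) st.2.2
      · omega
      · omega
      · exact hnd'
      · exact hq'
      · exact hVmem'
      · intro y hy z hz hinB hzF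
        rw [htake1] at hy
        rcases List.mem_append.mp hy with h | h
        · exact hmono' z (hdone y h z hz hinB hzF)
        · rw [List.mem_singleton] at h; subst h
          exact hvis' z hz hinB hzF
      · rw [hw', htake1, hw]
        simp [pvWaterAt]
      · rw [hext]; exact List.mem_append_left _ hseed
    · rw [pvBfsB_succ, if_neg hlt]
      obtain ⟨a, b, c, d, e, f⟩ :=
        bfsB_done g s V₀ hV₀c V queue qi water hnd hq hVmem hdone hw hseed (by omega)
      exact ⟨queue, a, b, c, d, e, f⟩

lemma countAdjWater_eq_sum (g : List (List String)) (cl : List (Int × Int)) :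
    pvCountAdjWater g cl = (cl.map (pvWaterAt g)).sum := by
  unfold pvCountAdjWater
  have hinner : ∀ (acc : Int), ∀ p ∈ cl,
      (pvNbrs p).foldl (fun a q =>
        if pvInB g q.1 q.2 = true ∧ pvTile g q.1 q.2 = some "water" then a + 1 else a) acc
      = acc + pvWaterAt g p := by
    intro acc p _
    rw [PySem.List.foldl_ite_add_one]
    rfl
  rw [PySem.List.foldl_congr_mem cl _ (fun acc p => acc + pvWaterAt g p) 0 hinner,
    PySem.List.foldl_add]
  simp

set_option maxHeartbeats 1000000 in
lemma outer_main (g : List (List String)) :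
    ∀ (cells : List (Int × Int)) (VA VB : PySem.Set (Int × Int))
      (cls : List (List (Int × Int))) (tot : Int),
    (∀ p ∈ cells, pvInB g p.1 p.2 = true) →
    (∀ x, x ∈ VA ↔ x ∈ VB) →
    ClosedV g VA →
    (∀ x ∈ VA, Farm g x) →
    tot = 7 * ((cls.countP (fun cl => decide (pvCountAdjWater g cl ≥ 3))) : Int) →
    (cells.foldl (pvStepB g) (VB, tot)).2
      = 7 * (((cells.foldl (pvStepA g) (VA, cls)).2.countP (fun cl => decide (pvCountAdjWater g cl ≥ 3))) : Int) := by
  intro cells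
  induction cells with
  | nil =>
    intro VA VB cls tot hcells hmem hcA hfA htot
    simpa using htot
  | cons p cells ih =>
    intro VA VB cls tot hcells hmem hcA hfA htot
    have hpInB : pvInB g p.1 p.2 = true := hcells p (by simp)
    rw [List.foldl_cons, List.foldl_cons]
    by_cases hfarm : pvTile g p.1 p.2 = some "farm"
    · by_cases hvis : p ∈ VA
      · -- already visited: both sides skip
        have hA : pvStepA g (VA, cls) p = (VA, cls) := by
          have : ¬ (¬ PySem.Set.contains VA p = true ∧ pvTile g p.1 p.2 = some "farm") :=
            fun h => h.1 ((PySem.Set.contains_iff VA p).mpr hvis)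
          simp only [pvStepA]; rw [if_neg this]
        have hB : pvStepB g (VB, tot) p = (VB, tot) := by
          have : ¬ (pvTile g p.1 p.2 = some "farm" ∧ ¬ PySem.Set.contains VB p = true) :=
            fun h => h.2 ((PySem.Set.contains_iff VB p).mpr ((hmem p).mp hvis))
          simp only [pvStepB]; rw [if_neg this]
        rw [hA, hB]
        exact ih VA VB cls tot (fun q hq => hcells q (by simp [hq])) hmem hcA hfA htot
      · -- new seed: A runs its DFS, B its BFS; both collect the component of p
        have hsF : Farm g p := ⟨hpInB, hfarm⟩
        have hvisB : p ∉ VB := fun h => hvis ((hmem p).mpr h)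
        have hcB : ClosedV g VB :=
          fun a b ha hadj => (hmem b).mp (hcA a b ((hmem a).mpr ha) hadj)
        have hA : pvStepA g (VA, cls) p
            = ((pvDfsA g "farm" (pvFuelA g) [p] VA []).1,
               cls ++ [(pvDfsA g "farm" (pvFuelA g) [p] VA []).2]) := by
          have hcond : (¬ PySem.Set.contains VA p = true ∧ pvTile g p.1 p.2 = some "farm") :=
            ⟨fun h => hvis ((PySem.Set.contains_iff VA p).mp h), hfarm⟩
          simp only [pvStepA]; rw [if_pos hcond]
        have hB : pvStepB g (VB, tot) p
            = ((pvBfsB g (pvFuelB g) (PySem.Set.add VB p) [p] 0 0).1,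
               if (pvBfsB g (pvFuelB g) (PySem.Set.add VB p) [p] 0 0).2 ≥ 3 then tot + 7 else tot) := by
          have hcond : (pvTile g p.1 p.2 = some "farm" ∧ ¬ PySem.Set.contains VB p = true) :=
            ⟨hfarm, fun h => hvisB ((PySem.Set.contains_iff VB p).mp h)⟩
          simp only [pvStepB]; rw [if_pos hcond]
        set rA := pvDfsA g "farm" (pvFuelA g) [p] VA [] with hrA
        set rB := pvBfsB g (pvFuelB g) (PySem.Set.add VB p) [p] 0 0 with hrB
        obtain ⟨cnd, cVmem, cprops, cseed, cclosure⟩ :=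
          dfsA_main g p hsF VA hcA hvis (pvFuelA g) [p] VA []
            (by
              have := UC_le g VA
              simp only [pvFuelA, List.length_singleton]
              omega)
            (by intro x; simp)
            (by simp) (by simp) (by simp)
            (by
              intro x hx
              rw [List.mem_singleton] at hx; subst hx
              exact ⟨hpInB, fun _ => Relation.ReflTransGen.refl⟩)
            (by simp) (Or.inl (by simp))
        obtain ⟨Q, Qnd, QVmem, Qprops, Qseed, Qclosure, Qwater⟩ :=
          bfsB_main g p hsF VB hcB hvisB (pvFuelB g) (PySem.Set.add VB p) [p] 0 0
            (by
              have h1 := UC_le g (PySem.Set.add VB p)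
              simp only [pvFuelB, List.length_singleton]
              omega)
            (by simp) (List.nodup_singleton p)
            (by
              intro x hx
              rw [List.mem_singleton] at hx; subst hx
              exact ⟨hsF, Relation.ReflTransGen.refl, fun h => hvis ((hmem x).mpr h)⟩)
            (by intro x; rw [PySem.Set.mem_add]; simp)
            (by simp) (by simp) (by simp)
        have ccomp : ∀ x, x ∈ rA.2 ↔ Conn g p x :=
          fun x => ⟨fun h => (cprops x h).1, fun h => conn_mem_of_closed cseed cclosure x h⟩
        have Qcomp : ∀ x, x ∈ Q ↔ Conn g p x :=
          fun x => ⟨fun h => (Qprops x h).1, fun h => conn_mem_of_closed Qseed Qclosure x h⟩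
        have hperm : rA.2.Perm Q :=
          (List.perm_ext_iff_of_nodup cnd Qnd).mpr (fun x => (ccomp x).trans (Qcomp x).symm)
        have hwEq : pvCountAdjWater g rA.2 = rB.2 := by
          rw [countAdjWater_eq_sum, Qwater]
          exact (hperm.map (pvWaterAt g)).sum_eq
        rw [hA, hB]
        rw [ih rA.1 rB.1 (cls ++ [rA.2]) (if rB.2 ≥ 3 then tot + 7 else tot)
          (fun q hq => hcells q (by simp [hq]))
          (by
            intro x
            rw [cVmem x, QVmem x]
            constructor
            · rintro (h | h)
              · exact Or.inl ((hmem x).mp h)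
              · exact Or.inr ((Qcomp x).mpr ((ccomp x).mp h))
            · rintro (h | h)
              · exact Or.inl ((hmem x).mpr h)
              · exact Or.inr ((ccomp x).mpr ((Qcomp x).mp h))
            )
          (by
            intro a b ha hadj
            rcases (cVmem a).mp ha with h | h
            · exact (cVmem b).mpr (Or.inl (hcA a b h hadj))
            · exact (cVmem b).mpr (Or.inr (cclosure a h b hadj)))
          (by
            intro x hx
            rcases (cVmem x).mp hx with h | h
            · exact hfA x h
            · exact conn_farm hsF ((ccomp x).mp h))
          (by
            rw [htot, List.countP_append]
            by_cases h3 : pvCountAdjWater g rA.2 ≥ 3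
            · rw [if_pos (hwEq ▸ h3)]
              simp only [List.countP_cons, List.countP_nil, h3, decide_true]
              push_cast
              ring
            · rw [if_neg (hwEq ▸ h3)]
              simp only [List.countP_cons, List.countP_nil, h3, decide_false]
              push_cast
              ring)]
    · -- not a farm tile: both sides skip
      have hA : pvStepA g (VA, cls) p = (VA, cls) := by
        have : ¬ (¬ PySem.Set.contains VA p = true ∧ pvTile g p.1 p.2 = some "farm") :=
          fun h => hfarm h.2
        simp only [pvStepA]; rw [if_neg this]
      have hB : pvStepB g (VB, tot) p = (VB, tot) := by
        have : ¬ (pvTile g p.1 p.2 = some "farm" ∧ ¬ PySem.Set.contains VB p = true) :=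
          fun h => hfarm h.1
        simp only [pvStepB]; rw [if_neg this]
      rw [hA, hB]
      exact ih VA VB cls tot (fun q hq => hcells q (by simp [hq])) hmem hcA hfA htot

lemma fold_flatten (g : List (List String)) {α : Type} (f : α → (Int × Int) → α) (init : α) :
    (List.range g.length).foldl (fun st row =>
      (List.range (g.headD []).length).foldl (fun st col => f st ((row : Int), (col : Int))) st) init
    = (pvCells g).foldl f init := by
  rw [pvCells, List.foldl_flatMap]
  congr 1
  funext acc r
  rw [List.foldl_map]

-- ===== VERDICT (by name: the statement is the Claim_ definition above) =====
theorem craylund_spec : Claim_equal_craylund := by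
  intro grid hdom hpre
  unfold Spec_craylund
  by_cases hg : grid = []
  · subst hg; decide
  · unfold craylund craylund_alt
    rw [if_neg (by simp [hg])]
    rw [fold_flatten grid (pvStepA grid), fold_flatten grid (pvStepB grid)]
    have hout := outer_main grid (pvCells grid) PySem.Set.empty PySem.Set.empty [] 0
      (fun p hp => mem_pvCells.mp hp)
      (fun x => Iff.rfl)
      (by intro a b ha; simp [PySem.Set.empty] at ha)
      (by intro x hx; simp [PySem.Set.empty] at hx)
      (by simp)
    rw [hout]
    simp only [ge_iff_le]
    rw [PySem.List.foldl_ite_add_one (fun cl => 3 ≤ pvCountAdjWater grid cl)]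
    ring
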